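-- pv_equiv track=rewrite | github.com/EmanAbdelhaleem/Leetcode_Problems | Split-Array-Largest-Sum.py | days_to_finish
-- ===== SOURCE A (Python) =====
-- def days_to_finish(nums, mid):
--     days = 1
--     cur = 0
--     max_sum = 0
--     for i in nums:
--         if cur+i > mid:
--             days+=1
--             cur = 0
--         cur += i
--         max_sum = max(max_sum, cur)
--     return [days, max_sum]
-- ===== SOURCE B (Python) =====
-- def days_to_finish(nums, mid):
--     # First pass: materialize the greedy segments (start a new one when cur+i would exceed mid).
--     segments = []
--     seg = []
--     cur = 0
--     for i in nums:
--         if cur + i > mid: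
--             segments.append(seg)
--             seg = []
--             cur = 0
--         seg.append(i)
--         cur += i
--     segments.append(seg)
--     # Second pass: max over all within-segment running partial sums (and 0).
--     max_sum = 0
--     for s in segments:
--         run = 0
--         for x in s:
--             run += x
--             max_sum = max(max_sum, run)
--     return [len(segments), max_sum]
-- ===== Notes on version B (the rewrite author's own statement) =====
-- stated objective: alternative
-- what changed: Replaces A's fused single pass (days/cur/max_sum updated together) by a two-phase decomposition: first materialize the greedy segment list, then compute the day count as its length and the maximum over within-segment running partial sums in a separate pass.
import Mathlib
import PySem

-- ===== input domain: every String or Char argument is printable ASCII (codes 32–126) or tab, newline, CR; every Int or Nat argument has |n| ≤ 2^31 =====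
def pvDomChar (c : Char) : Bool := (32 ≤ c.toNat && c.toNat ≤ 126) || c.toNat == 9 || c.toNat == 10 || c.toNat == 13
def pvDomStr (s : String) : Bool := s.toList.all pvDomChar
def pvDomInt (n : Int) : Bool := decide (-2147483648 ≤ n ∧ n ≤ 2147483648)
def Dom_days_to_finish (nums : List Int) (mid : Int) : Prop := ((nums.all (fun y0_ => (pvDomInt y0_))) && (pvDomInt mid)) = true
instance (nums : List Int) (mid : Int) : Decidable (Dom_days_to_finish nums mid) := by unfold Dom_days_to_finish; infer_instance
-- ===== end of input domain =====

-- B replaces A's fused single pass by a two-phase decomposition (materialize greedy segments,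
-- then count and scan them); same cost, alternative structure.


-- ===== PORT A =====
-- literal transliteration of A's single fused loop over (days, cur, max_sum)
def days_to_finish (nums : List Int) (mid : Int) : List Int :=
  let s := nums.foldl (fun (st : Int × Int × Int) i =>
    let days := st.1
    let cur := st.2.1
    let ms := st.2.2
    let dc : Int × Int := if cur + i > mid then (days + 1, 0) else (days, cur)
    let cur' := dc.2 + i
    (dc.1, cur', max ms cur')) (1, 0, 0)
  [s.1, s.2.2]

-- ===== PORT B =====
-- first pass of Source B: build the greedy segment list (state: finished segments, current segment, its sum)
def pvSegStep (mid : Int) (st : List (List Int) × List Int × Int) (i : Int) :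
    List (List Int) × List Int × Int :=
  let segs := st.1
  let seg := st.2.1
  let cur := st.2.2
  if cur + i > mid then (segs ++ [seg], [i], i) else (segs, seg ++ [i], cur + i)

-- inner step of Source B's second pass: running partial sum and running maximum
def pvRunStep (st : Int × Int) (x : Int) : Int × Int := (st.1 + x, max st.2 (st.1 + x))

def days_to_finish_alt (nums : List Int) (mid : Int) : List Int :=
  let st := nums.foldl (pvSegStep mid) ([], [], 0)
  let segments := st.1 ++ [st.2.1]
  let max_sum := segments.foldl (fun m s => (s.foldl pvRunStep (0, m)).2) 0
  [(segments.length : Int), max_sum]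

-- ===== PRECONDITION & SPEC =====
def Spec_days_to_finish (nums : List Int) (mid : Int) (out : List Int) : Prop := out = days_to_finish_alt nums mid
instance (nums : List Int) (mid : Int) (out : List Int) : Decidable (Spec_days_to_finish nums mid out) := by unfold Spec_days_to_finish; infer_instance

-- ===== CLAIM (what is proved, stated in full; the proofs are below) =====
def Claim_equal_days_to_finish : Prop := ∀ (nums : List Int) (mid : Int), Dom_days_to_finish nums mid → Spec_days_to_finish nums mid (days_to_finish nums mid)

-- ===== LEMMAS AND PROOFS =====

-- second-pass value over a list of finished segments
def pvP (segs : List (List Int)) : Int :=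
  segs.foldl (fun m s => (s.foldl pvRunStep (0, m)).2) 0

-- (run, max) state of the second pass while scanning the current segment
def pvQ (segs : List (List Int)) (seg : List Int) : Int × Int :=
  seg.foldl pvRunStep (0, pvP segs)

lemma pvP_append (segs : List (List Int)) (seg : List Int) :
    pvP (segs ++ [seg]) = (pvQ segs seg).2 := by
  simp [pvP, pvQ, List.foldl_append]

lemma pvKey (mid : Int) : ∀ (nums : List Int) (segs : List (List Int)) (seg : List Int),
    nums.foldl (fun (st : Int × Int × Int) i =>
      let days := st.1
      let cur := st.2.1
      let ms := st.2.2
      let dc : Int × Int := if cur + i > mid then (days + 1, 0) else (days, cur)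
      let cur' := dc.2 + i
      (dc.1, cur', max ms cur'))
      ((segs.length : Int) + 1, (pvQ segs seg).1, (pvQ segs seg).2)
    = (let st := nums.foldl (pvSegStep mid) (segs, seg, (pvQ segs seg).1)
       (((st.1).length : Int) + 1, (pvQ st.1 st.2.1).1, (pvQ st.1 st.2.1).2)) := by
  intro nums
  induction nums with
  | nil => intro segs seg; rfl
  | cons i rest ih =>
    intro segs seg
    by_cases h : (pvQ segs seg).1 + i > mid
    · have hq : pvQ (segs ++ [seg]) [i] = (i, max (pvQ segs seg).2 i) := by
        simp [pvQ, pvP_append, pvRunStep]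
      have hstep : (pvSegStep mid (segs, seg, (pvQ segs seg).1) i)
          = (segs ++ [seg], [i], i) := by
        simp [pvSegStep, h]
      have := ih (segs ++ [seg]) [i]
      simp only [List.foldl_cons, hstep, hq] at this ⊢
      simp only [h]
      simpa [hq, List.length_append] using this
    · have hq : pvQ segs (seg ++ [i])
          = ((pvQ segs seg).1 + i, max (pvQ segs seg).2 ((pvQ segs seg).1 + i)) := by
        simp [pvQ, List.foldl_append, pvRunStep]
      have hstep : (pvSegStep mid (segs, seg, (pvQ segs seg).1) i)
          = (segs, seg ++ [i], (pvQ segs seg).1 + i) := by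
        simp [pvSegStep, h]
      have := ih segs (seg ++ [i])
      simp only [List.foldl_cons, hstep, hq] at this ⊢
      simp only [if_neg h]
      simpa [hq] using this

-- ===== VERDICT (by name: the statement is the Claim_ definition above) =====
theorem days_to_finish_spec : Claim_equal_days_to_finish := by
  intro nums mid _
  unfold Spec_days_to_finish days_to_finish days_to_finish_alt
  have h := pvKey mid nums [] []
  have h0 : pvQ [] [] = ((0 : Int), (0 : Int)) := by rfl
  rw [h0] at h
  simp only [List.length_nil, Nat.cast_zero, zero_add] at h
  rw [h]
  simp [pvQ, pvP, List.length_append]
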